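-- pv_equiv track=rewrite | github.com/pypi-data/pypi-mirror-386 | packages/rustybt/rustybt-0.3.3-cp312-cp312-macosx_15_0_arm64.whl/rustybt/data/adapters/utils.py | build_symbol_sid_map
-- ===== SOURCE A (Python) =====
-- from collections.abc import Awaitable, Iterable
--
-- def build_symbol_sid_map(symbols: Iterable[str]) -> dict[str, int]:
--     """Build deterministic SID mapping for symbols."""
--     mapping: dict[str, int] = {}
--     next_sid = 1
--
--     for symbol in symbols:
--         normalized_symbol = symbol.upper().strip()
--         if normalized_symbol not in mapping:
--             mapping[normalized_symbol] = next_sid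
--             next_sid += 1
--
--     return mapping
-- ===== SOURCE B (Python) =====
-- def build_symbol_sid_map(symbols):
--     """Build deterministic SID mapping for symbols."""
--     normalized = [s.upper().strip() for s in symbols]
--     first_pos = {}
--     for i, s in reversed(list(enumerate(normalized))):
--         first_pos[s] = i
--     ordered = sorted(first_pos, key=first_pos.get)
--     return {s: sid for sid, s in enumerate(ordered, start=1)}
-- ===== Notes on version B (the rewrite author's own statement) =====
-- stated objective: alternative
-- what changed: Replaces A's forward loop with a seen-dict membership test and hand-maintained sid counter by a different strategy: a reverse pass overwrites first_pos[s]=i so each normalized symbol ends up with its first-occurrence index, then sorting the keys by that index recovers first-occurrence order and enumerate(start=1) assigns sids.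
import Mathlib
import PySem

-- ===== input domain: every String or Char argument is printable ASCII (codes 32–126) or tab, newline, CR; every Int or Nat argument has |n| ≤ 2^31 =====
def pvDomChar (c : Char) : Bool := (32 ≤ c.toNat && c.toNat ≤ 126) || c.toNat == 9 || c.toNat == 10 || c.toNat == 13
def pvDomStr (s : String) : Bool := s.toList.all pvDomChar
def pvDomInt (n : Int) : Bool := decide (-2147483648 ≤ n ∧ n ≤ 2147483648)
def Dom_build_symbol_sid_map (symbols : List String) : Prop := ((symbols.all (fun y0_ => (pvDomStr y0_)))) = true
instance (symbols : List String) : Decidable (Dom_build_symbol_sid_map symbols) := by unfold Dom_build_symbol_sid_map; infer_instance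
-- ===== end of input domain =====

-- B replaces A's seen-set membership loop with a different strategy: a reverse overwrite pass
-- records each normalized symbol's first-occurrence index, then a sort by that index recovers
-- first-occurrence order and enumeration assigns sids (alternative algorithm, same output).

-- ===== PORT A =====
-- one forward loop: dict membership test + hand-maintained next_sid counter
def build_symbol_sid_map (symbols : List String) : List (String × Int) :=
  let st := symbols.foldl
    (fun (st : PySem.Dict String Int × Int) symbol =>
      let normalized_symbol := PySem.Str.strip (PySem.Str.upper symbol)
      if st.1.contains normalized_symbol then st
      else (st.1.insert normalized_symbol st.2, st.2 + 1))
    (PySem.Dict.empty, 1)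
  st.1.items

-- ===== PORT B =====
-- reverse pass overwriting first_pos[s] = i, then sort keys by stored first index, then enumerate.
-- first_pos.get is total on the keys being sorted, so it is ported as getD _ 0 (exact here);
-- the final dict comprehension ranges over distinct keys, so its items are the enumerated pairs.
def build_symbol_sid_map_alt (symbols : List String) : List (String × Int) :=
  let normalized := symbols.map (fun s => PySem.Str.strip (PySem.Str.upper s))
  let first_pos := (PySem.List.enumerate normalized 0).reverse.foldl
    (fun (d : PySem.Dict String Int) (p : Int × String) => d.insert p.2 p.1) PySem.Dict.empty
  let ordered := PySem.List.sorted first_pos.keys (fun s => first_pos.getD s 0) false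
  (PySem.List.enumerate ordered 1).map (fun p => (p.2, p.1))

-- ===== PRECONDITION & SPEC =====
def Spec_build_symbol_sid_map (symbols : List String) (out : List (String × Int)) : Prop := out = build_symbol_sid_map_alt symbols
instance (symbols : List String) (out : List (String × Int)) : Decidable (Spec_build_symbol_sid_map symbols out) := by unfold Spec_build_symbol_sid_map; infer_instance

-- ===== CLAIM (what is proved, stated in full; the proofs are below) =====
def Claim_equal_build_symbol_sid_map : Prop := ∀ (symbols : List String), Dom_build_symbol_sid_map symbols → Spec_build_symbol_sid_map symbols (build_symbol_sid_map symbols)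

-- ===== LEMMAS AND PROOFS =====

-- the elements of l that are new relative to `seen`, in first-occurrence order
def pvNewE (seen : List String) : List String → List String
  | [] => []
  | x :: xs => if seen.contains x then pvNewE seen xs else x :: pvNewE (seen ++ [x]) xs

lemma pvLoop (l : List String) (d : PySem.Dict String Int) :
    (l.foldl
      (fun (st : PySem.Dict String Int × Int) x =>
        if st.1.contains x then st else (st.1.insert x st.2, st.2 + 1))
      (d, 1 + (d.size : Int))).1.items
    = d.items ++ (PySem.List.enumerate (pvNewE d.keys l) (1 + (d.size : Int))).map (fun p => (p.2, p.1)) := by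
  induction l generalizing d with
  | nil => simp [pvNewE]
  | cons x xs ih =>
    simp only [List.foldl_cons, pvNewE]
    by_cases h : d.contains x = true
    · have hmem : x ∈ d.keys := (PySem.Dict.contains_iff_mem_keys d x).1 h
      have hc : d.keys.contains x := by simpa using hmem
      rw [h]
      simp only [if_pos hc]
      exact ih d
    · have hne : d.contains x = false := by simpa using h
      have hmem : x ∉ d.keys := fun hm => h ((PySem.Dict.contains_iff_mem_keys d x).2 hm)
      have hc : d.keys.contains x = false := by simpa using hmem
      rw [hne]
      simp only [Bool.false_eq_true, if_false, hc]
      have hsize : (1 + (d.size : Int)) + 1 = 1 + (((d.insert x (1 + (d.size : Int))).size : Int)) := by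
        rw [PySem.Dict.size_insert]
        simp [hne]
        ring
      have hkeys : (d.insert x (1 + (d.size : Int))).keys = d.keys ++ [x] :=
        PySem.Dict.keys_insert_of_not_contains _ _ hne
      have hitems : (d.insert x (1 + (d.size : Int))).items = d.items ++ [(x, 1 + (d.size : Int))] :=
        PySem.Dict.items_insert_of_not_contains _ _ hne
      have hrec := ih (d.insert x (1 + (d.size : Int)))
      rw [hkeys, hitems] at hrec
      rw [hsize, hrec, ← hsize]
      simp [PySem.List.enumerate_cons]

-- membership in pvNewE
lemma pvNewE_mem (l : List String) (seen : List String) (s : String) :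
    s ∈ pvNewE seen l ↔ s ∈ l ∧ s ∉ seen := by
  induction l generalizing seen with
  | nil => simp [pvNewE]
  | cons x xs ih =>
    simp only [pvNewE]
    by_cases h : x ∈ seen
    · have hc : seen.contains x := by simpa using h
      rw [if_pos hc, ih]
      constructor
      · rintro ⟨hs, hns⟩; exact ⟨List.mem_cons_of_mem _ hs, hns⟩
      · rintro ⟨hs, hns⟩
        rcases List.mem_cons.1 hs with rfl | hs'
        · exact absurd h hns
        · exact ⟨hs', hns⟩
    · have hc : seen.contains x = false := by simpa using h
      rw [hc]
      simp only [Bool.false_eq_true, if_false, List.mem_cons, ih, List.mem_append]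
      constructor
      · rintro (rfl | ⟨hs, hns⟩)
        · exact ⟨Or.inl rfl, h⟩
        · exact ⟨Or.inr hs, fun hm => hns (Or.inl hm)⟩
      · rintro ⟨rfl | hs, hns⟩
        · exact Or.inl rfl
        · by_cases hx : s = x
          · exact Or.inl hx
          · refine Or.inr ⟨hs, ?_⟩
            rintro (hm | hm)
            · exact hns hm
            · exact hx (by simpa using hm)

-- pvNewE lists first-occurrence indices in strictly increasing order
lemma pvNewE_pairwise (l : List String) (seen : List String) :
    (pvNewE seen l).Pairwise (fun a b => l.idxOf a < l.idxOf b) := by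
  induction l generalizing seen with
  | nil => simp [pvNewE]
  | cons x xs ih =>
    simp only [pvNewE]
    by_cases h : x ∈ seen
    · have hc : seen.contains x := by simpa using h
      rw [if_pos hc]
      refine ((ih seen).imp_of_mem ?_)
      intro a b ha hb hab
      have hax : a ≠ x := by
        intro e; exact ((pvNewE_mem xs seen a).1 ha).2 (by rw [e]; exact h)
      have hbx : b ≠ x := by
        intro e; exact ((pvNewE_mem xs seen b).1 hb).2 (by rw [e]; exact h)
      rw [List.idxOf_cons_ne _ (Ne.symm hax), List.idxOf_cons_ne _ (Ne.symm hbx)]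
      omega
    · have hc : seen.contains x = false := by simpa using h
      rw [hc]
      simp only [Bool.false_eq_true, if_false]
      refine List.Pairwise.cons ?_ ?_
      · intro b hb
        have hbx : b ≠ x := by
          intro e; exact ((pvNewE_mem xs (seen ++ [x]) b).1 hb).2 (by simp [e])
        rw [List.idxOf_cons_self, List.idxOf_cons_ne _ (Ne.symm hbx)]
        omega
      · refine ((ih (seen ++ [x])).imp_of_mem ?_)
        intro a b ha hb hab
        have hax : a ≠ x := by
          intro e; exact ((pvNewE_mem xs (seen ++ [x]) a).1 ha).2 (by simp [e])
        have hbx : b ≠ x := by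
          intro e; exact ((pvNewE_mem xs (seen ++ [x]) b).1 hb).2 (by simp [e])
        rw [List.idxOf_cons_ne _ (Ne.symm hax), List.idxOf_cons_ne _ (Ne.symm hbx)]
        omega

lemma pvNewE_nodup (l : List String) (seen : List String) : (pvNewE seen l).Nodup :=
  (pvNewE_pairwise l seen).imp (fun h => by rintro rfl; omega)

-- get? of the foldr-of-insert over pairs equals the FIRST matching pair
lemma pvGetFoldr (ps : List (Int × String)) (d : PySem.Dict String Int) (s : String) :
    (ps.foldr (fun (p : Int × String) (d : PySem.Dict String Int) => d.insert p.2 p.1) d).get? s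
      = (match ps.find? (fun p => p.2 == s) with
         | some p => some p.1
         | none => d.get? s) := by
  induction ps with
  | nil => simp
  | cons p ps ih =>
    simp only [List.foldr_cons, List.find?_cons]
    by_cases h : p.2 = s
    · subst h
      simp [PySem.Dict.get?_insert_self]
    · have hb : (p.2 == s) = false := by simpa using h
      rw [hb]
      rw [PySem.Dict.get?_insert_of_ne _ _ (Ne.symm h)]
      simpa using ih

-- the first enumerate pair matching s carries l.idxOf s
lemma pvFindEnum (l : List String) (n : Int) (s : String) :
    (PySem.List.enumerate l n).find? (fun p => p.2 == s)
      = if s ∈ l then some (n + (l.idxOf s : Int), s) else none := by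
  induction l generalizing n with
  | nil => simp [PySem.List.enumerate]
  | cons x xs ih =>
    rw [PySem.List.enumerate_cons, List.find?_cons]
    by_cases h : x = s
    · subst h
      simp [List.idxOf_cons_self]
    · have hb : (x == s) = false := by simpa using h
      rw [hb, ih]
      by_cases hm : s ∈ xs
      · rw [if_pos hm, if_pos (List.mem_cons_of_mem _ hm)]
        rw [List.idxOf_cons_ne _ (by simpa using h)]
        push_cast
        ring_nf
      · rw [if_neg hm, if_neg (by simp [Ne.symm h, hm])]

-- ===== VERDICT (by name: the statement is the Claim_ definition above) =====
theorem build_symbol_sid_map_spec : Claim_equal_build_symbol_sid_map := by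
  intro symbols _
  simp only [Spec_build_symbol_sid_map, build_symbol_sid_map, build_symbol_sid_map_alt]
  set l := symbols.map (fun s => PySem.Str.strip (PySem.Str.upper s)) with hl
  -- A's side: items = enumerate of pvNewE [] l
  have hA : (symbols.foldl
      (fun (st : PySem.Dict String Int × Int) symbol =>
        let normalized_symbol := PySem.Str.strip (PySem.Str.upper symbol)
        if st.1.contains normalized_symbol then st
        else (st.1.insert normalized_symbol st.2, st.2 + 1))
      (PySem.Dict.empty, 1)).1.items
      = (PySem.List.enumerate (pvNewE [] l) 1).map (fun p => (p.2, p.1)) := by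
    have hmap : (symbols.foldl
        (fun (st : PySem.Dict String Int × Int) symbol =>
          let normalized_symbol := PySem.Str.strip (PySem.Str.upper symbol)
          if st.1.contains normalized_symbol then st
          else (st.1.insert normalized_symbol st.2, st.2 + 1))
        (PySem.Dict.empty, 1))
        = (l.foldl
        (fun (st : PySem.Dict String Int × Int) x =>
          if st.1.contains x then st else (st.1.insert x st.2, st.2 + 1))
        (PySem.Dict.empty, 1)) := by
      rw [hl, List.foldl_map]
    rw [hmap]
    have key := pvLoop l PySem.Dict.empty
    have hemp : (PySem.Dict.empty : PySem.Dict String Int).items = [] := rfl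
    simpa [PySem.Dict.size_empty, hemp, PySem.Dict.keys_empty] using key
  rw [hA]
  -- B's side: the sorted key list equals pvNewE [] l
  set d := (PySem.List.enumerate l 0).reverse.foldl
    (fun (d : PySem.Dict String Int) (p : Int × String) => d.insert p.2 p.1) PySem.Dict.empty with hd
  have hget : ∀ s, d.get? s = if s ∈ l then some ((l.idxOf s : Int)) else none := by
    intro s
    have hfr : d = (PySem.List.enumerate l 0).foldr
        (fun (p : Int × String) (d : PySem.Dict String Int) => d.insert p.2 p.1) PySem.Dict.empty := by
      rw [hd, List.foldl_reverse]
    rw [hfr, pvGetFoldr, pvFindEnum]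
    by_cases hm : s ∈ l
    · simp [hm]
    · simp [hm, PySem.Dict.get?_empty]
  have hnodup : d.keys.Nodup := by
    rw [hd]
    exact PySem.Dict.nodup_keys_foldl_insert_key _ (fun (p : Int × String) => p.2)
      (fun _ (p : Int × String) => p.1) _ (by simp [PySem.Dict.keys_empty])
  have hkeysmem : ∀ s, s ∈ d.keys ↔ s ∈ l := by
    intro s
    rw [← PySem.Dict.contains_iff_mem_keys]
    by_cases hm : s ∈ l
    · simp only [hm, iff_true]
      have : d.get? s = some ((l.idxOf s : Int)) := by rw [hget]; simp [hm]
      rw [PySem.Dict.contains_eq_isSome_get?, this]; rfl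
    · simp only [hm, iff_false]
      have : d.get? s = none := by rw [hget]; simp [hm]
      rw [PySem.Dict.contains_eq_isSome_get?, this]; simp
  have hperm : (pvNewE [] l).Perm d.keys := by
    rw [List.perm_ext_iff_of_nodup (pvNewE_nodup l []) hnodup]
    intro s
    rw [pvNewE_mem, hkeysmem]
    simp
  have hpw : (pvNewE [] l).Pairwise
      (fun a b => d.getD a 0 < d.getD b 0) := by
    refine (pvNewE_pairwise l []).imp_of_mem ?_
    intro a b ha hb hab
    have hal : a ∈ l := ((pvNewE_mem l [] a).1 ha).1
    have hbl : b ∈ l := ((pvNewE_mem l [] b).1 hb).1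
    have hga : d.getD a 0 = (l.idxOf a : Int) := by
      rw [PySem.Dict.getD_eq_get?_getD, hget]; simp [hal]
    have hgb : d.getD b 0 = (l.idxOf b : Int) := by
      rw [PySem.Dict.getD_eq_get?_getD, hget]; simp [hbl]
    rw [hga, hgb]
    exact_mod_cast hab
  have hsorted : PySem.List.sorted d.keys (fun s => d.getD s 0) false = pvNewE [] l :=
    PySem.List.sorted_eq_of_perm_of_pairwise_lt _ _ _ hperm hpw
  simp only [hsorted]
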